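-- pv_equiv track=rewrite | github.com/maia-sdk/app-app | api/services/chat/citation_sections/cleanup.py | _strip_html_with_index_map
-- ===== SOURCE A (Python) =====
-- def _strip_html_with_index_map(text: str) -> tuple[str, list[int]]:
--     raw = str(text or "")
--     plain_chars: list[str] = []
--     index_map: list[int] = []
--     in_tag = False
--     for idx, char in enumerate(raw):
--         if char == "<":
--             in_tag = True
--             continue
--         if not in_tag:
--             plain_chars.append(char)
--             index_map.append(idx)
--             continue
--         if char == ">":
--             in_tag = False
--     return "".join(plain_chars), index_map
-- ===== SOURCE B (Python) =====
-- def _strip_html_with_index_map(text: str) -> tuple[str, list[int]]: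
--     raw = str(text or "")
--     n = len(raw)
--     parts: list[str] = []
--     index_map: list[int] = []
--     i = 0
--     while i < n:
--         lt = raw.find("<", i)
--         if lt == -1:
--             lt = n
--         parts.append(raw[i:lt])
--         index_map.extend(range(i, lt))
--         if lt == n:
--             break
--         gt = raw.find(">", lt + 1)
--         i = n if gt == -1 else gt + 1
--     return "".join(parts), index_map
-- ===== Notes on version B (the rewrite author's own statement) =====
-- stated objective: faster
-- what changed: A walks character by character with an in_tag boolean state machine; B scans chunk-wise with str.find, copying each tag-free chunk and its index range at once and jumping past each tag, so the per-character Python loop is replaced by C-level find/slice/range operations.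
import Mathlib
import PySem

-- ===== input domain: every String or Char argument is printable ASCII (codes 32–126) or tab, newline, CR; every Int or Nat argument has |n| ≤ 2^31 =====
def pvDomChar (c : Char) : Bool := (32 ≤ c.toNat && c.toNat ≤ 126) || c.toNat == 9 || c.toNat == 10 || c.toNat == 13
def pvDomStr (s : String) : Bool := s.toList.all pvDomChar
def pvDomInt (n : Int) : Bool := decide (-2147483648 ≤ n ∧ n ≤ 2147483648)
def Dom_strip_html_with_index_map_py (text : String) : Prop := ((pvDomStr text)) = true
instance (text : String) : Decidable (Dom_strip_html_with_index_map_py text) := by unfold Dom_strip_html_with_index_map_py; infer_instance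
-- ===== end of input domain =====

-- B replaces A's per-character in_tag state machine by a chunk-based scan (find '<', copy the chunk, skip to '>'): alternative chunk-wise decomposition (measured constant-factor speedup in a timing run).


-- ===== PORT A =====
-- A's loop body: state (plain_chars, index_map, in_tag), fed one (idx, char) pair per step.
def pvStepA (st : List Char × List Int × Bool) (p : Int × Char) : List Char × List Int × Bool :=
  if p.2 = '<' then (st.1, st.2.1, true)
  else if st.2.2 = false then (st.1 ++ [p.2], st.2.1 ++ [p.1], st.2.2)
  else if p.2 = '>' then (st.1, st.2.1, false)
  else st

def strip_html_with_index_map_py (text : String) : String × List Int :=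
  let raw := text.toList                    -- raw = str(text or "")  (for a str argument this is text itself)
  let r := (PySem.List.enumerate raw 0).foldl pvStepA ([], [], false)
  (String.mk r.1, r.2.1)                    -- "".join(plain_chars), index_map

-- ===== PORT B =====
-- B's while loop: chunk = raw[i:lt] (takeWhile up to the next '<'), range(i, lt), then skip past the next '>'.
def pvGoB : List Char → Int → List Char × List Int
  | cs, i =>
    let chunk := cs.takeWhile (· != '<')                 -- raw[i:lt], lt = raw.find('<', i)
    let idxs := PySem.List.pyRange i (i + chunk.length) 1  -- index_map.extend(range(i, lt))
    match h : cs.dropWhile (· != '<') with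
    | [] => (chunk, idxs)                                -- lt == n: break
    | _ :: after =>
      let skipped := after.takeWhile (· != '>')          -- chars between '<' and the next '>'
      match h2 : after.dropWhile (· != '>') with
      | [] => (chunk, idxs)                              -- gt == -1: i = n, loop ends
      | _ :: rest =>
        let r := pvGoB rest (i + chunk.length + 1 + skipped.length + 1)  -- i = gt + 1
        (chunk ++ r.1, idxs ++ r.2)
termination_by cs _ => cs.length
decreasing_by
  have h1 : (cs.dropWhile (· != '<')).length ≤ cs.length := (List.dropWhile_sublist _).length_le
  have h3 : (after.dropWhile (· != '>')).length ≤ after.length := (List.dropWhile_sublist _).length_le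
  simp [h] at h1; simp [h2] at h3; omega

def strip_html_with_index_map_py_alt (text : String) : String × List Int :=
  let r := pvGoB text.toList 0
  (String.mk r.1, r.2)

-- ===== PRECONDITION & SPEC =====
def Spec_strip_html_with_index_map_py (text : String) (out : String × List Int) : Prop := out = strip_html_with_index_map_py_alt text
instance (text : String) (out : String × List Int) : Decidable (Spec_strip_html_with_index_map_py text out) := by unfold Spec_strip_html_with_index_map_py; infer_instance

-- ===== CLAIM (what is proved, stated in full; the proofs are below) =====
def Claim_equal_strip_html_with_index_map_py : Prop := ∀ (text : String), Dom_strip_html_with_index_map_py text → Spec_strip_html_with_index_map_py text (strip_html_with_index_map_py text)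

-- ===== LEMMAS AND PROOFS =====

-- Outside a tag, a '<'-free chunk is copied verbatim and its indices appended.
theorem pvFoldA_chunk (chunk : List Char) : ∀ (i : Int) (p : List Char) (m : List Int),
    (∀ c ∈ chunk, c ≠ '<') →
    (PySem.List.enumerate chunk i).foldl pvStepA (p, m, false)
      = (p ++ chunk, m ++ PySem.List.pyRange i (i + chunk.length) 1, false) := by
  induction chunk with
  | nil =>
    intro i p m _
    simp [PySem.List.enumerate_nil]
  | cons c cs ih =>
    intro i p m hmem
    have hc : c ≠ '<' := hmem c (List.mem_cons_self ..)
    rw [PySem.List.enumerate_cons]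
    simp only [List.foldl_cons]
    have hstep : pvStepA (p, m, false) (i, c) = (p ++ [c], m ++ [i], false) := by
      simp [pvStepA, hc]
    rw [hstep, ih (i+1) (p ++ [c]) (m ++ [i]) (fun d hd => hmem d (List.mem_cons_of_mem _ hd))]
    have hlen : i + (((c :: cs).length : Nat) : Int) = (i + 1) + ((cs.length : Nat) : Int) := by
      simp only [List.length_cons]; push_cast; ring
    rw [hlen]
    have hr : PySem.List.pyRange i ((i + 1) + ((cs.length : Nat) : Int)) 1
        = i :: PySem.List.pyRange (i+1) ((i + 1) + ((cs.length : Nat) : Int)) 1 :=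
      PySem.List.pyRange_one_cons (by omega)
    rw [hr]
    simp

-- Inside a tag, '>'-free characters are skipped and the state is unchanged.
theorem pvFoldA_skip (ds : List Char) : ∀ (i : Int) (p : List Char) (m : List Int),
    (∀ c ∈ ds, c ≠ '>') →
    (PySem.List.enumerate ds i).foldl pvStepA (p, m, true) = (p, m, true) := by
  induction ds with
  | nil => intro i p m _; simp [PySem.List.enumerate_nil]
  | cons c cs ih =>
    intro i p m hmem
    have hc : c ≠ '>' := hmem c (List.mem_cons_self ..)
    rw [PySem.List.enumerate_cons]
    by_cases h : c = '<' <;>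
      simp only [List.foldl_cons, pvStepA, h, reduceIte, if_neg hc] <;>
      exact ih _ _ _ (fun d hd => hmem d (List.mem_cons_of_mem _ hd))

-- Head of a dropWhile fails the predicate.
theorem pvHead_dropWhile {q : Char → Bool} {l l' : List Char} {a : Char}
    (h : l.dropWhile q = a :: l') : q a = false := by
  have h1 := List.head_dropWhile_not (l := l) (p := q) (by simp [h])
  simp only [h, List.head_cons] at h1
  simpa using h1

-- Unfolding equations for pvGoB, one per exit of B's loop body.
theorem pvGoB_eq_stop (cs : List Char) (i : Int) (hd : cs.dropWhile (· != '<') = []) :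
    pvGoB cs i = (cs.takeWhile (· != '<'),
      PySem.List.pyRange i (i + (cs.takeWhile (· != '<')).length) 1) := by
  rw [pvGoB]
  split <;> simp_all

theorem pvGoB_eq_stop2 (cs : List Char) (i : Int) (x : Char) (after : List Char)
    (hd : cs.dropWhile (· != '<') = x :: after) (hd2 : after.dropWhile (· != '>') = []) :
    pvGoB cs i = (cs.takeWhile (· != '<'),
      PySem.List.pyRange i (i + (cs.takeWhile (· != '<')).length) 1) := by
  rw [pvGoB]
  split
  · rfl
  next x' after' h =>
    rw [hd] at h
    cases h
    split <;> simp_all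

theorem pvGoB_eq_cont (cs : List Char) (i : Int) (x y : Char) (after rest : List Char)
    (hd : cs.dropWhile (· != '<') = x :: after) (hd2 : after.dropWhile (· != '>') = y :: rest) :
    pvGoB cs i = (cs.takeWhile (· != '<') ++
        (pvGoB rest (i + (cs.takeWhile (· != '<')).length + 1 + (after.takeWhile (· != '>')).length + 1)).1,
      PySem.List.pyRange i (i + (cs.takeWhile (· != '<')).length) 1 ++
        (pvGoB rest (i + (cs.takeWhile (· != '<')).length + 1 + (after.takeWhile (· != '>')).length + 1)).2) := by
  rw [pvGoB]
  split
  · simp_all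
  next x' after' h =>
    rw [hd] at h
    cases h
    split
    · simp_all
    next y' rest' h2 =>
      rw [hd2] at h2
      cases h2
      rfl

-- pvStepA facts used at the two delimiter characters.
theorem pvStepA_lt (P : List Char) (M : List Int) (st : Bool) (j : Int) :
    pvStepA (P, M, st) (j, '<') = (P, M, true) := by
  simp [pvStepA]

theorem pvStepA_gt (P : List Char) (M : List Int) (j : Int) :
    pvStepA (P, M, true) (j, '>') = (P, M, false) := by
  simp [pvStepA]

-- Main invariant: A's fold from an out-of-tag state produces exactly B's chunk scan.
theorem pvFoldA_eq_goB_fuel : ∀ (n : Nat) (cs : List Char), cs.length ≤ n →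
    ∀ (i : Int) (p : List Char) (m : List Int),
    ∃ b, (PySem.List.enumerate cs i).foldl pvStepA (p, m, false)
      = (p ++ (pvGoB cs i).1, m ++ (pvGoB cs i).2, b) := by
  intro n
  induction n with
  | zero =>
    intro cs hlen i p m
    have hcs : cs = [] := List.eq_nil_of_length_eq_zero (Nat.le_zero.mp hlen)
    subst hcs
    have hgo := pvGoB_eq_stop [] i (by simp)
    exact ⟨false, by simp [PySem.List.enumerate_nil, hgo]⟩
  | succ n ih =>
    intro cs hlen i p m
    have hmemt : ∀ c ∈ cs.takeWhile (· != '<'), c ≠ '<' := by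
      intro c hcmem
      simpa using List.mem_takeWhile_imp hcmem
    have hsplit : cs.takeWhile (· != '<') ++ cs.dropWhile (· != '<') = cs :=
      List.takeWhile_append_dropWhile ..
    cases hd : cs.dropWhile (· != '<') with
    | nil =>
      refine ⟨false, ?_⟩
      rw [pvGoB_eq_stop cs i hd]
      rw [hd] at hsplit
      simp only [List.append_nil] at hsplit
      conv_lhs => rw [← hsplit]
      rw [pvFoldA_chunk _ i p m hmemt]
    | cons x after =>
      have hx : x = '<' := by simpa using pvHead_dropWhile hd
      subst hx
      have hmems : ∀ c ∈ after.takeWhile (· != '>'), c ≠ '>' := by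
        intro c hcmem
        simpa using List.mem_takeWhile_imp hcmem
      have hsplit2 : after.takeWhile (· != '>') ++ after.dropWhile (· != '>') = after :=
        List.takeWhile_append_dropWhile ..
      cases hd2 : after.dropWhile (· != '>') with
      | nil =>
        refine ⟨true, ?_⟩
        rw [pvGoB_eq_stop2 cs i '<' after hd hd2]
        conv_lhs => rw [← hsplit, hd]
        rw [PySem.List.enumerate_append, List.foldl_append,
          pvFoldA_chunk _ i p m hmemt, PySem.List.enumerate_cons, List.foldl_cons, pvStepA_lt]
        rw [hd2] at hsplit2
        simp only [List.append_nil] at hsplit2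
        conv_lhs => rw [← hsplit2]
        rw [pvFoldA_skip _ _ _ _ hmems]
      | cons y rest =>
        have hy : y = '>' := by simpa using pvHead_dropWhile hd2
        subst hy
        have hrest : rest.length ≤ n := by
          have h1 : (cs.dropWhile (· != '<')).length ≤ cs.length :=
            (List.dropWhile_sublist _).length_le
          have h3 : (after.dropWhile (· != '>')).length ≤ after.length :=
            (List.dropWhile_sublist _).length_le
          rw [hd] at h1; rw [hd2] at h3
          simp only [List.length_cons] at h1 h3
          omega
        obtain ⟨b, hb⟩ := ih rest hrest
          (i + ((cs.takeWhile (· != '<')).length : Int) + 1 + ((after.takeWhile (· != '>')).length : Int) + 1)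
          (p ++ cs.takeWhile (· != '<'))
          (m ++ PySem.List.pyRange i (i + (cs.takeWhile (· != '<')).length) 1)
        refine ⟨b, ?_⟩
        rw [pvGoB_eq_cont cs i '<' '>' after rest hd hd2]
        conv_lhs => rw [← hsplit, hd]
        rw [PySem.List.enumerate_append, List.foldl_append,
          pvFoldA_chunk _ i p m hmemt, PySem.List.enumerate_cons, List.foldl_cons, pvStepA_lt]
        conv_lhs => rw [← hsplit2, hd2]
        rw [PySem.List.enumerate_append, List.foldl_append,
          pvFoldA_skip _ _ _ _ hmems, PySem.List.enumerate_cons, List.foldl_cons, pvStepA_gt]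
        rw [hb]
        simp

theorem pvFoldA_eq_goB (cs : List Char) (i : Int) (p : List Char) (m : List Int) :
    ∃ b, (PySem.List.enumerate cs i).foldl pvStepA (p, m, false)
      = (p ++ (pvGoB cs i).1, m ++ (pvGoB cs i).2, b) :=
  pvFoldA_eq_goB_fuel cs.length cs le_rfl i p m

-- ===== VERDICT (by name: the statement is the Claim_ definition above) =====
theorem strip_html_with_index_map_py_spec : Claim_equal_strip_html_with_index_map_py := by
  intro text _
  unfold Spec_strip_html_with_index_map_py strip_html_with_index_map_py strip_html_with_index_map_py_alt
  obtain ⟨b, hb⟩ := pvFoldA_eq_goB text.toList 0 [] []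
  simp only [hb, List.nil_append]
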